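-- pv_equiv track=rewrite | github.com/TiMeLeSsWorld00/ASCPD | module3/src/inverted_index.py | delta_compress
-- ===== SOURCE A (Python) =====
-- from typing import List
--
-- def delta_compress(numbers: List[int]) -> int:
--     bitstream = []
--     previous_number = 0
--     for number in numbers:
--         delta = number - previous_number  # store deltas, much smaller numbers
--         N = delta.bit_length()
--         M = N.bit_length() - 1
--         encoded_N = '0' * M + format(N, 'b')[:]
--         encoded_number = format(delta, 'b')[1:]
--         res = encoded_N + encoded_number
--         bitstream.append(res[::-1])
--         previous_number = number
--     bitstream.reverse()
--     return int(''.join(bitstream), 2)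
-- ===== SOURCE B (Python) =====
-- from typing import List
--
-- def _rev(x: int, w: int) -> int:
--     # value of the low w bits of x, in reversed bit order
--     r = 0
--     for _ in range(w):
--         r = (r << 1) + (x % 2)
--         x >>= 1
--     return r
--
-- def delta_compress(numbers: List[int]) -> int:
--     # Pure bit arithmetic: no strings are built at all.  Each element
--     # contributes a piece of pos-indexed bits added into an integer
--     # accumulator; returns 0 for an empty list (where the original raises).
--     acc = 0
--     pos = 0
--     previous_number = 0
--     for number in numbers:
--         delta = number - previous_number
--         a = abs(delta)
--         N = a.bit_length()
--         L = N.bit_length()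
--         M = max(L - 1, 0)          # leading zero run
--         Lw = max(L, 1)             # width of N's binary form ('0' has width 1)
--         acc += _rev(N, Lw) << (pos + M)
--         if delta > 0:
--             e, ew = _rev(a, N) >> 1, N - 1   # drop the leading 1-bit
--         elif delta < 0:
--             e, ew = _rev(a, N), N            # full magnitude bits
--         else:
--             e, ew = 0, 0
--         acc += e << (pos + M + Lw)
--         pos += M + Lw + ew
--         previous_number = number
--     return acc
-- ===== Notes on version B (the rewrite author's own statement) =====
-- stated objective: alternative
-- what changed: A builds per-delta bit strings with format(), reverses each, reverses the list, joins and re-parses with int(s,2); B builds no strings at all: it computes each piece's reversed bit value arithmetically (bit-reversal of the magnitude and of the bit-length header) and adds it into an integer accumulator at a running bit position.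
import Mathlib
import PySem

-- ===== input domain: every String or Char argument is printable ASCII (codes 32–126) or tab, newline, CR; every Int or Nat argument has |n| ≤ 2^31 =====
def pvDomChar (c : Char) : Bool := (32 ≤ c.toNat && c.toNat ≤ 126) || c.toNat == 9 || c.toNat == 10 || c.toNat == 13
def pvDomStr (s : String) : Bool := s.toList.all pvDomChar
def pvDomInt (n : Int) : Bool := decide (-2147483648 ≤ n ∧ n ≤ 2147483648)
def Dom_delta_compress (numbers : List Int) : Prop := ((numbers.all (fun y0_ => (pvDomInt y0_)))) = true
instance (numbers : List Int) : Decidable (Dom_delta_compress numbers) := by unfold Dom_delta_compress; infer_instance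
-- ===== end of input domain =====

-- B replaces A's string pipeline (build per-delta bit strings, reverse each, reverse the
-- list, join, re-parse with int(·,2)) by pure bit arithmetic into an integer accumulator.

-- ===== PORT A =====
-- int(s, 2) for the strings this program joins (nonempty, digits '0'/'1' only): a left fold
-- over the digits.  Hand-ported: the general primitive PySem.Int.ofCharsBase? also accepts
-- signs/whitespace/underscores, which cannot occur here; on '' Python raises ValueError
-- (excluded by Pre_delta_compress), this total function returns 0 there.
def pyParseBin2 (s : List Char) : Int :=
  s.foldl (fun v c => v * 2 + (if c = '1' then 1 else 0)) 0

-- the for-loop of A: state = (bitstream, previous_number)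
def delta_compress_loop : List Int → List (List Char) → Int → List (List Char)
  | [], bitstream, _ => bitstream
  | number :: rest, bitstream, previous_number =>
    let delta := number - previous_number
    let N := PySem.Int.bitLength delta                                   -- delta.bit_length()
    let M : Int := (PySem.Int.bitLength (N : Int) : Int) - 1             -- N.bit_length() - 1
    let encoded_N := List.replicate M.toNat '0' ++ PySem.Int.toBinChars (N : Int)
      -- '0' * M (empty for M < 0, as in Python) ++ format(N,'b')[:]
    let encoded_number := (PySem.Int.toBinChars delta).drop 1            -- format(delta,'b')[1:]
    let res := encoded_N ++ encoded_number
    delta_compress_loop rest (bitstream ++ [res.reverse]) number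

def delta_compress (numbers : List Int) : Int :=
  pyParseBin2 ((delta_compress_loop numbers [] 0).reverse.flatten)

-- ===== PORT B =====
-- _rev(x, w): w iterations of r = (r << 1) + (x % 2); x >>= 1, as structural recursion on w
def pvRevGo : Nat → Int → Int → Int
  | 0, r, _ => r
  | w + 1, r, x => pvRevGo w ((r <<< (1:Nat)) + PySem.Int.mod x 2) (x >>> (1:Nat))

def pvRev (x : Int) (w : Nat) : Int := pvRevGo w 0 x

-- the for-loop of B: state = (acc, pos, previous_number); pos and the bit widths are the
-- Python ints N, L, M, Lw, ew, always ≥ 0 there, carried as Nat (exact)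
def delta_compress_alt_loop : List Int → Int → Nat → Int → Int
  | [], acc, _, _ => acc
  | number :: rest, acc, pos, previous_number =>
    let delta := number - previous_number
    let a : Int := |delta|
    let N := PySem.Int.bitLength a
    let L := PySem.Int.bitLength (N : Int)
    let M := L - 1                                          -- max(L - 1, 0): Nat subtraction
    let Lw := max L 1
    let acc1 := acc + (pvRev (N : Int) Lw <<< (pos + M))
    let ee : Int × Nat :=
      if delta > 0 then (pvRev a N >>> (1:Nat), N - 1)
      else if delta < 0 then (pvRev a N, N)
      else (0, 0)
    let acc2 := acc1 + (ee.1 <<< (pos + M + Lw))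
    delta_compress_alt_loop rest acc2 (pos + M + Lw + ee.2) number

def delta_compress_alt (numbers : List Int) : Int :=
  delta_compress_alt_loop numbers 0 0 0

-- ===== PRECONDITION & SPEC =====
-- Pre_ excludes only the empty list, on which Python A raises ValueError (int('', 2));
-- B returns 0 there.
def Pre_delta_compress (numbers : List Int) : Prop := numbers ≠ []
instance (numbers : List Int) : Decidable (Pre_delta_compress numbers) := by
  unfold Pre_delta_compress; infer_instance

def pvWitness_delta_compress : List Int := ([3, 1] : List Int)

def Spec_delta_compress (numbers : List Int) (out : Int) : Prop := out = delta_compress_alt numbers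
instance (numbers : List Int) (out : Int) : Decidable (Spec_delta_compress numbers out) := by
  unfold Spec_delta_compress; infer_instance

-- ===== CLAIM (what is proved, stated in full; the proofs are below) =====
def Claim_equal_delta_compress : Prop := ∀ (numbers : List Int), Dom_delta_compress numbers → Pre_delta_compress numbers → Spec_delta_compress numbers (delta_compress numbers)

-- ===== LEMMAS AND PROOFS =====

-- bit value of a digit character
def bit2 (c : Char) : Int := if c = '1' then 1 else 0

-- value of a bit string read LSB-FIRST
def lsbVal : List Char → Int
  | [] => 0
  | c :: t => bit2 c + 2 * lsbVal t

-- bit_length on naturals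
def blN (n : Nat) : Nat := PySem.Int.bitLength (n : Nat)

-- msb-first binary digits, the recursion Nat.toDigits 2 follows
def fmt2 (n : Nat) : List Char :=
  if n < 2 then [Nat.digitChar n] else fmt2 (n / 2) ++ [Nat.digitChar (n % 2)]
  decreasing_by exact Nat.div_lt_self (by omega) (by omega)

-- the per-element string A builds, as a function of delta
def pieceStrD (delta : Int) : List Char :=
  let N := PySem.Int.bitLength delta
  List.replicate ((PySem.Int.bitLength (N : Int) : Int) - 1).toNat '0' ++
    PySem.Int.toBinChars (N : Int) ++ (PySem.Int.toBinChars delta).drop 1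

-- the forward per-element strings for a run of the loop
def piecesP : Int → List Int → List (List Char)
  | _, [] => []
  | prev, num :: rest => pieceStrD (num - prev) :: piecesP num rest

lemma blN_succ (n : Nat) (h : 0 < n) : blN n = blN (n / 2) + 1 := by
  simpa [blN] using PySem.Int.bitLength_natCast h

lemma blN_pos (n : Nat) (h : 0 < n) : 0 < blN n := by
  rw [blN_succ n h]; omega

lemma toDigitsCore_eq_fmt2 (f n : Nat) (l : List Char) (h : n < f) :
    Nat.toDigitsCore 2 f n l = fmt2 n ++ l := by
  induction f generalizing n l with
  | zero => omega
  | succ f ih =>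
    rw [Nat.toDigitsCore]
    by_cases hx : n / 2 = 0
    · have hn : n < 2 := by omega
      rw [if_pos hx, fmt2, if_pos hn, Nat.mod_eq_of_lt hn]
      simp
    · rw [if_neg hx, ih (n / 2) _ (by omega)]
      conv_rhs => rw [fmt2, if_neg (by omega)]
      simp

lemma toDigits_two_eq_fmt2 (n : Nat) : Nat.toDigits 2 n = fmt2 n := by
  simpa using toDigitsCore_eq_fmt2 (n + 1) n [] (by omega)

lemma toBinChars_natCast (n : Nat) : PySem.Int.toBinChars (n : Int) = fmt2 n := by
  simp [PySem.Int.toBinChars, toDigits_two_eq_fmt2]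

lemma toBinChars_neg_natCast (n : Nat) (h : 0 < n) :
    PySem.Int.toBinChars (-(n : Int)) = '-' :: fmt2 n := by
  rw [PySem.Int.toBinChars, if_pos (by omega)]
  simp [toDigits_two_eq_fmt2]

lemma lsbVal_append (a b : List Char) :
    lsbVal (a ++ b) = lsbVal a + 2 ^ a.length * lsbVal b := by
  induction a with
  | nil => simp [lsbVal]
  | cons c t ih => simp [lsbVal, ih, pow_succ]; ring

lemma lsbVal_replicate_zero (m : Nat) : lsbVal (List.replicate m '0') = 0 := by
  induction m with
  | zero => rfl
  | succ m ih => simp [List.replicate_succ, lsbVal, ih, bit2]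

lemma pyParseBin2_append_singleton (l : List Char) (c : Char) :
    pyParseBin2 (l ++ [c]) = pyParseBin2 l * 2 + bit2 c := by
  simp [pyParseBin2, bit2, List.foldl_append]

lemma pyParseBin2_reverse (s : List Char) : pyParseBin2 s.reverse = lsbVal s := by
  induction s with
  | nil => rfl
  | cons c t ih =>
    rw [List.reverse_cons, pyParseBin2_append_singleton, ih, lsbVal]
    ring

lemma pvRevGo_acc (w : Nat) (r x : Int) : pvRevGo w r x = r * 2 ^ w + pvRevGo w 0 x := by
  induction w generalizing r x with
  | zero => simp [pvRevGo]
  | succ w ih =>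
    rw [pvRevGo, pvRevGo, ih (r <<< (1:Nat) + PySem.Int.mod x 2)]
    conv_rhs => rw [ih]
    simp [Int.shiftLeft_eq, pow_succ]
    ring

lemma pvRev_succ (x : Int) (w : Nat) :
    pvRev x (w + 1) = PySem.Int.mod x 2 * 2 ^ w + pvRev (x >>> (1:Nat)) w := by
  rw [pvRev, pvRevGo, pvRevGo_acc, pvRev]
  simp [Int.shiftLeft_eq]

lemma fmt2_length (n : Nat) : (fmt2 n).length = max (blN n) 1 := by
  induction n using Nat.strong_induction_on with
  | _ n ih =>
    by_cases hn : n < 2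
    · interval_cases n <;> rw [fmt2] <;> decide
    · rw [fmt2, if_neg hn]
      have h2 : (0:Nat) < n / 2 := by omega
      have := blN_pos (n / 2) h2
      rw [List.length_append, ih (n / 2) (by omega), blN_succ n (by omega)]
      simp; omega

lemma lsbVal_fmt2 (n : Nat) : lsbVal (fmt2 n) = pvRev (n : Int) (max (blN n) 1) := by
  induction n using Nat.strong_induction_on with
  | _ n ih =>
    by_cases hn : n < 2
    · interval_cases n <;> rw [fmt2] <;> decide
    · have h2 : (0:Nat) < n / 2 := by omega
      have hb := blN_pos (n / 2) h2
      have hmax : max (blN (n / 2)) 1 = blN (n / 2) := by omega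
      rw [fmt2, if_neg hn, lsbVal_append, ih (n / 2) (by omega), fmt2_length,
        blN_succ n (by omega)]
      have hcast : ((n:Int)) >>> (1:Nat) = ((n / 2 : Nat) : Int) := by
        rw [Int.shiftRight_eq_div_pow]; omega
      have : max (blN (n / 2) + 1) 1 = blN (n / 2) + 1 := by omega
      rw [this, pvRev_succ, hcast, hmax]
      have hm : PySem.Int.mod (n:Int) 2 = ((n % 2 : Nat) : Int) := by
        exact_mod_cast PySem.Int.mod_natCast n 2
      rw [hm]
      rcases Nat.mod_two_eq_zero_or_one n with h | h
      · simp [lsbVal, bit2, h, Nat.digitChar]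
      · simp [lsbVal, bit2, h, Nat.digitChar]; ring

lemma fmt2_head (n : Nat) (h : 0 < n) : ∃ t, fmt2 n = '1' :: t := by
  induction n using Nat.strong_induction_on with
  | _ n ih =>
    by_cases hn : n < 2
    · have : n = 1 := by omega
      subst this
      exact ⟨[], by rw [fmt2]; simp; rfl⟩
    · obtain ⟨t, ht⟩ := ih (n / 2) (by omega) (by omega)
      exact ⟨t ++ [Nat.digitChar (n % 2)], by rw [fmt2, if_neg hn, ht]; simp⟩

lemma lsbVal_nonneg (s : List Char) : 0 ≤ lsbVal s := by
  induction s with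
  | nil => simp [lsbVal]
  | cons c t ih =>
    rw [lsbVal, bit2]
    split_ifs <;> omega

lemma bitLength_abs (z : Int) : PySem.Int.bitLength |z| = PySem.Int.bitLength z := by
  rcases abs_choice z with h | h
  · rw [h]
  · rw [h]; simp

-- per-element: value and length of A's string = B's contributions
lemma piece_eq (delta : Int) :
    (lsbVal (pieceStrD delta) =
      pvRev (PySem.Int.bitLength delta : Int) (max (blN (PySem.Int.bitLength delta)) 1)
        * 2 ^ (blN (PySem.Int.bitLength delta) - 1) +
      (if delta > 0 then pvRev (|delta|) (PySem.Int.bitLength delta) >>> (1:Nat)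
       else if delta < 0 then pvRev (|delta|) (PySem.Int.bitLength delta) else 0)
        * 2 ^ ((blN (PySem.Int.bitLength delta) - 1) + max (blN (PySem.Int.bitLength delta)) 1)) ∧
    (pieceStrD delta).length =
      (blN (PySem.Int.bitLength delta) - 1) + max (blN (PySem.Int.bitLength delta)) 1 +
      (if delta > 0 then PySem.Int.bitLength delta - 1
       else if delta < 0 then PySem.Int.bitLength delta else 0) := by
  rcases lt_trichotomy delta 0 with hneg | hz | hpos
  · -- delta < 0
    obtain ⟨a, ha, rfl⟩ : ∃ a : Nat, 0 < a ∧ delta = -(a : Int) :=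
      ⟨delta.natAbs, by omega, by omega⟩
    have hbl : PySem.Int.bitLength (-(a : Int)) = blN a := by simp [blN]
    have habs : |(-(a : Int))| = (a : Int) := by rw [abs_neg, abs_of_nonneg] ; positivity
    have hb1 : 1 ≤ blN a := blN_pos a ha
    have hmax : max (blN a) 1 = blN a := by omega
    have hcond1 : ¬ (-(a : Int) > 0) := by omega
    have hcond2 : -(a : Int) < 0 := by omega
    simp only [pieceStrD, hbl, habs, if_neg hcond1, if_pos hcond2,
      toBinChars_neg_natCast a ha, toBinChars_natCast, List.drop_succ_cons, List.drop_zero]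
    have hbl2 : PySem.Int.bitLength ((blN a : Nat) : Int) = blN (blN a) := rfl
    have hM : (((blN (blN a) : Int)) - 1).toNat = blN (blN a) - 1 := by omega
    constructor
    · rw [lsbVal_append, lsbVal_append, lsbVal_replicate_zero, lsbVal_fmt2, lsbVal_fmt2]
      simp only [hbl2, hM, List.length_append, List.length_replicate, fmt2_length, hmax]
      rw [pow_add]
      ring
    · simp only [List.length_append, List.length_replicate, fmt2_length, hbl2, hM, hmax]
  · -- delta = 0
    subst hz
    constructor <;> decide
  · -- delta > 0
    obtain ⟨a, ha, rfl⟩ : ∃ a : Nat, 0 < a ∧ delta = (a : Int) :=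
      ⟨delta.natAbs, by omega, by omega⟩
    have hbl : PySem.Int.bitLength ((a : Int)) = blN a := rfl
    have habs : |((a : Int))| = (a : Int) := abs_of_nonneg (by positivity)
    have hb1 : 1 ≤ blN a := blN_pos a ha
    have hmax : max (blN a) 1 = blN a := by omega
    have hcond1 : ((a : Int)) > 0 := by omega
    obtain ⟨t, ht⟩ := fmt2_head a ha
    have hlt : lsbVal (fmt2 a) = 1 + 2 * lsbVal t := by
      rw [ht, lsbVal]; norm_num [bit2]
    have hrv : pvRev (a : Int) (blN a) = 1 + 2 * lsbVal t := by
      rw [← hmax, ← lsbVal_fmt2, hlt]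
    have hshift : pvRev (a : Int) (blN a) >>> (1:Nat) = lsbVal t := by
      rw [hrv, Int.shiftRight_eq_div_pow]
      have := lsbVal_nonneg t
      omega
    have htlen : t.length = blN a - 1 := by
      have := fmt2_length a
      rw [ht] at this
      simp at this
      omega
    simp only [pieceStrD, hbl, habs, if_pos hcond1, toBinChars_natCast, ht,
      List.drop_succ_cons, List.drop_zero]
    have hbl2 : PySem.Int.bitLength ((blN a : Nat) : Int) = blN (blN a) := rfl
    have hM : (((blN (blN a) : Int)) - 1).toNat = blN (blN a) - 1 := by omega
    constructor
    · rw [lsbVal_append, lsbVal_append, lsbVal_replicate_zero, lsbVal_fmt2, hshift]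
      simp only [hbl2, hM, List.length_append, List.length_replicate, fmt2_length]
      rw [pow_add]
      ring
    · simp only [List.length_append, List.length_replicate, fmt2_length,
        hbl2, hM, htlen]

lemma blN_def (m : Nat) : PySem.Int.bitLength (m : Int) = blN m := rfl

lemma loopA_eq (nums : List Int) (bs : List (List Char)) (prev : Int) :
    delta_compress_loop nums bs prev = bs ++ (piecesP prev nums).map List.reverse := by
  induction nums generalizing bs prev with
  | nil => simp [delta_compress_loop, piecesP]
  | cons num rest ih =>
    rw [delta_compress_loop, ih]
    simp [piecesP, pieceStrD, List.append_assoc]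

lemma loopB_eq (nums : List Int) (acc : Int) (pos : Nat) (prev : Int) :
    delta_compress_alt_loop nums acc pos prev =
      acc + 2 ^ pos * lsbVal (piecesP prev nums).flatten := by
  induction nums generalizing acc pos prev with
  | nil => simp [delta_compress_alt_loop, piecesP, lsbVal]
  | cons num rest ih =>
    rw [delta_compress_alt_loop, ih]
    obtain ⟨hval, hlen⟩ := piece_eq (num - prev)
    simp only [piecesP, List.flatten_cons, lsbVal_append, hval, hlen, bitLength_abs,
      Int.shiftLeft_eq, blN_def]
    rcases lt_trichotomy (num - prev) 0 with h | h | h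
    · simp only [if_neg (by omega : ¬ (num - prev > 0)), if_pos h, pow_add]
      ring
    · simp only [h]
      norm_num
      rw [pow_add, pow_add]
      ring
    · simp only [if_pos h, pow_add]
      ring

-- ===== VERDICT (by name: the statement is the Claim_ definition above) =====
theorem delta_compress_spec : Claim_equal_delta_compress := by
  intro numbers _ _
  unfold Spec_delta_compress delta_compress delta_compress_alt
  rw [loopA_eq, loopB_eq, List.nil_append,
    (List.reverse_flatten (L := piecesP 0 numbers)).symm, pyParseBin2_reverse]
  simp
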